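-- pv_equiv track=rewrite | github.com/moosefs/moosefs | mfsscripts/common/utils.py | disablesmask_to_string_list
-- ===== SOURCE A (Python) =====
-- def disablesmask_to_string_list(disables_mask):
-- 	cmds = ["chown","chmod","symlink","mkfifo","mkdev","mksock","mkdir","unlink","rmdir","rename","move","link","create","readdir","read","write","truncate","setlength","appendchunks","snapshot","settrash","setsclass","seteattr","setxattr","setfacl"]
-- 	l = []
-- 	m = 1
-- 	for cmd in cmds:
-- 		if disables_mask & m:
-- 			l.append(cmd)
-- 		m <<= 1
-- 	return l
-- ===== SOURCE B (Python) =====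
-- def disablesmask_to_string_list(disables_mask):
-- 	cmds = ["chown","chmod","symlink","mkfifo","mkdev","mksock","mkdir","unlink","rmdir","rename","move","link","create","readdir","read","write","truncate","setlength","appendchunks","snapshot","settrash","setsclass","seteattr","setxattr","setfacl"]
-- 	# clamp to the 25-bit window A probes; then walk only the set bits, lowest first
-- 	m = disables_mask & 0x1FFFFFF
-- 	names = []
-- 	while m:
-- 		low = m & -m
-- 		names.append(cmds[low.bit_length() - 1])
-- 		m &= m - 1
-- 	return names
-- ===== Notes on version B (the rewrite author's own statement) =====
-- stated objective: alternative
-- what changed: B clamps the mask once to the window of command bits and then iterates only over the set bits (isolating the lowest set bit with m & -m, indexing the command by its bit_length, clearing it with m &= m - 1), instead of A's fixed scan of every command position with a shifting probe mask.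
import Mathlib
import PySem

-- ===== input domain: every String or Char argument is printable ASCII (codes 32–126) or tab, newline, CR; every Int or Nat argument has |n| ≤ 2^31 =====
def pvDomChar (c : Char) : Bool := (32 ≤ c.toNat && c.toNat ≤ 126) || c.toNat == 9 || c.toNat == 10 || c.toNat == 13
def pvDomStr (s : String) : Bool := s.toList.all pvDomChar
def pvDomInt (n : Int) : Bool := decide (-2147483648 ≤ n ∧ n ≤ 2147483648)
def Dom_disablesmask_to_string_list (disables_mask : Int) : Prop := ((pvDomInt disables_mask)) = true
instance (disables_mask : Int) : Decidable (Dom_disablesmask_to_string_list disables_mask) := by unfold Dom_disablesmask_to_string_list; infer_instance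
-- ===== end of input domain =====

-- B clamps the mask to A's 25-bit window and then walks only the set bits (lowest set bit via
-- m & -m and bit_length) instead of probing all 25 positions with a shifting mask; same value.

-- ===== PORT A =====
def disablesmask_to_string_list (disables_mask : Int) : List String :=
  let cmds : List String := ["chown","chmod","symlink","mkfifo","mkdev","mksock","mkdir","unlink","rmdir","rename","move","link","create","readdir","read","write","truncate","setlength","appendchunks","snapshot","settrash","setsclass","seteattr","setxattr","setfacl"]
  -- l = []; m = 1; for cmd in cmds: if disables_mask & m: l.append(cmd); m <<= 1
  -- ('m <<= 1' ported as 'm * 2': exact for Python ints)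
  (cmds.foldl
    (fun (st : List String × Int) cmd =>
      (if PySem.Int.band disables_mask st.2 ≠ 0 then st.1 ++ [cmd] else st.1, st.2 * 2))
    ([], 1)).1

-- ===== PORT B =====
-- the while-loop of Source B; its state m = disables_mask & 0x1FFFFFF is nonnegative, so it is
-- carried as a Nat (exact: every Python op in the loop happens on nonnegative ints).
-- 'cmds[low.bit_length() - 1]' is ported with getD: the index is provably < 25 on every call
-- reached from the clamped start, so the default is unreachable (Python never raises here).
def pvBLoop (cmds : List String) (acc : List String) (m : Nat) : List String :=
  if m = 0 then acc
  else
    -- low = m & -m; names.append(cmds[low.bit_length() - 1]); m &= m - 1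
    pvBLoop cmds
      (acc ++ [cmds.getD (PySem.Int.bitLength (PySem.Int.band (m : Int) (-(m : Int))) - 1) ""])
      (m &&& (m - 1))
termination_by m
decreasing_by exact Nat.lt_of_le_of_lt Nat.and_le_right (by omega)

def disablesmask_to_string_list_alt (disables_mask : Int) : List String :=
  let cmds : List String := ["chown","chmod","symlink","mkfifo","mkdev","mksock","mkdir","unlink","rmdir","rename","move","link","create","readdir","read","write","truncate","setlength","appendchunks","snapshot","settrash","setsclass","seteattr","setxattr","setfacl"]
  pvBLoop cmds [] (PySem.Int.band disables_mask 33554431).toNat   -- m = disables_mask & 0x1FFFFFF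

-- ===== PRECONDITION & SPEC =====
def Spec_disablesmask_to_string_list (disables_mask : Int) (out : List String) : Prop := out = disablesmask_to_string_list_alt disables_mask
instance (disables_mask : Int) (out : List String) : Decidable (Spec_disablesmask_to_string_list disables_mask out) := by unfold Spec_disablesmask_to_string_list; infer_instance

-- ===== CLAIM (what is proved, stated in full; the proofs are below) =====
def Claim_equal_disablesmask_to_string_list : Prop := ∀ (disables_mask : Int), Dom_disablesmask_to_string_list disables_mask → Spec_disablesmask_to_string_list disables_mask (disablesmask_to_string_list disables_mask)

-- ===== LEMMAS AND PROOFS =====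

-- common reference: keep cmds[i] iff bit i of m is set, bits consumed low to high
def pvFilt : Nat → List String → List String
  | _, [] => []
  | m, c :: l => (if m % 2 = 1 then [c] else []) ++ pvFilt (m / 2) l

theorem pvFilt_zero (l : List String) : pvFilt 0 l = [] := by
  induction l with
  | nil => rfl
  | cons c l ih => simp [pvFilt, ih]

-- every positive Nat is 2^i * (odd)
theorem pvExists2pow (m : Nat) (hm : 0 < m) : ∃ i q, m = 2 ^ i * (2 * q + 1) := by
  induction m using Nat.strong_induction_on with
  | _ m ih =>
    rcases Nat.mod_two_eq_zero_or_one m with h | h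
    · obtain ⟨i, q, hq⟩ := ih (m / 2) (by omega) (by omega)
      refine ⟨i + 1, q, ?_⟩
      have hm2 : m = 2 * (m / 2) := by omega
      rw [hm2, hq]; ring
    · exact ⟨0, m / 2, by omega⟩

-- m & (m - 1) clears the lowest set bit
theorem pvLandPred (i q : Nat) :
    (2 ^ i * (2 * q + 1)) &&& (2 ^ i * (2 * q + 1) - 1) = 2 ^ i * (2 * q) := by
  induction i generalizing q with
  | zero =>
    simp only [pow_zero, one_mul, Nat.add_sub_cancel]
    apply Nat.eq_of_testBit_eq
    intro j
    cases j with
    | zero => simp [Nat.testBit_zero]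
    | succ j =>
      rw [Nat.testBit_and, Nat.testBit_add_one, Nat.testBit_add_one]
      have h1 : (2 * q + 1) / 2 = q := by omega
      have h2 : 2 * q / 2 = q := by omega
      rw [h1, h2, Bool.and_self]
  | succ i ih =>
    have hpos : 0 < 2 ^ i * (2 * q + 1) := by positivity
    apply Nat.eq_of_testBit_eq
    intro j
    have e1 : 2 ^ (i+1) * (2 * q + 1) = 2 * (2 ^ i * (2 * q + 1)) := by ring
    have e2 : 2 ^ (i+1) * (2 * q) = 2 * (2 ^ i * (2 * q)) := by ring
    cases j with
    | zero => simp [Nat.testBit_zero, e1, e2]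
    | succ j =>
      rw [Nat.testBit_and, Nat.testBit_add_one, Nat.testBit_add_one, Nat.testBit_add_one, e1, e2]
      have h1 : 2 * (2 ^ i * (2 * q + 1)) / 2 = 2 ^ i * (2 * q + 1) := by omega
      have h2 : (2 * (2 ^ i * (2 * q + 1)) - 1) / 2 = 2 ^ i * (2 * q + 1) - 1 := by omega
      have h3 : 2 * (2 ^ i * (2 * q)) / 2 = 2 ^ i * (2 * q) := by omega
      rw [h1, h2, h3, ← Nat.testBit_and, ih]

theorem pvBitLengthTwoPow (i : Nat) : PySem.Int.bitLength ((2 ^ i : Nat) : Int) = i + 1 := by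
  induction i with
  | zero => simp; decide
  | succ i ih =>
    rw [PySem.Int.bitLength_natCast (by positivity)]
    have : 2 ^ (i + 1) / 2 = 2 ^ i := by rw [pow_succ]; omega
    rw [this, ih]

-- m & -m on a positive int, expressed through the Nat-side ops
theorem pvBandPosNeg (m : Nat) (hm : 0 < m) :
    PySem.Int.band (m : Int) (-(m : Int)) = ((m - (m &&& (m - 1)) : Nat) : Int) := by
  simp only [PySem.Int.band]
  rw [if_pos (by positivity), if_neg (by omega)]
  have h1 : ((m : Int)).toNat = m := by omega
  have h2 : (-(-(m : Int)) - 1).toNat = m - 1 := by omega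
  rw [h1, h2]

-- peeling the lowest set bit off pvFilt
theorem pvFiltDecomp (i q : Nat) (l : List String) (hi : i < l.length) :
    pvFilt (2 ^ i * (2 * q + 1)) l = l.getD i "" :: pvFilt (2 ^ i * (2 * q)) l := by
  induction i generalizing l with
  | zero =>
    cases l with
    | nil => simp at hi
    | cons c l =>
      simp only [pow_zero, one_mul, pvFilt]
      have h1 : (2 * q + 1) % 2 = 1 := by omega
      have h2 : (2 * q + 1) / 2 = q := by omega
      have h3 : 2 * q % 2 = 0 := by omega
      have h4 : 2 * q / 2 = q := by omega
      simp [h1, h2, h3, h4]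
  | succ i ih =>
    cases l with
    | nil => simp at hi
    | cons c l =>
      have e1 : 2 ^ (i+1) * (2 * q + 1) = 2 * (2 ^ i * (2 * q + 1)) := by ring
      have e2 : 2 ^ (i+1) * (2 * q) = 2 * (2 ^ i * (2 * q)) := by ring
      simp only [pvFilt, e1, e2, Nat.mul_mod_right, Nat.mul_div_cancel_left _ (by norm_num : 0 < 2)]
      have := ih l (by simpa using Nat.lt_of_succ_lt_succ hi)
      simp [this]

theorem pvBLoopEq (l : List String) (m : Nat) (hm : m < 2 ^ l.length) (acc : List String) :
    pvBLoop l acc m = acc ++ pvFilt m l := by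
  induction m using Nat.strong_induction_on generalizing acc with
  | _ m ih =>
    rw [pvBLoop]
    by_cases h0 : m = 0
    · rw [if_pos h0, h0, pvFilt_zero, List.append_nil]
    · rw [if_neg h0]
      obtain ⟨i, q, hiq⟩ := pvExists2pow m (by omega)
      have hpos : 0 < m := by omega
      have hland : m &&& (m - 1) = 2 ^ i * (2 * q) := by rw [hiq]; exact pvLandPred i q
      have he : m = 2 ^ i * (2 * q) + 2 ^ i := by rw [hiq]; ring
      have hp2 : 0 < 2 ^ i := by positivity
      have hsub : m - (m &&& (m - 1)) = 2 ^ i := by omega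
      have hlow : PySem.Int.band (m : Int) (-(m : Int)) = ((2 ^ i : Nat) : Int) := by
        rw [pvBandPosNeg m hpos, hsub]
      have hidx : PySem.Int.bitLength (PySem.Int.band (m : Int) (-(m : Int))) - 1 = i := by
        rw [hlow, pvBitLengthTwoPow]; omega
      have hile : 2 ^ i ≤ m := by
        rw [hiq]; exact Nat.le_mul_of_pos_right _ (by omega)
      have hi : i < l.length :=
        (Nat.pow_lt_pow_iff_right (by norm_num : (1:Nat) < 2)).1 (Nat.lt_of_le_of_lt hile hm)
      have hnext_lt : m &&& (m - 1) < m := Nat.lt_of_le_of_lt Nat.and_le_right (by omega)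
      rw [hidx, ih (m &&& (m - 1)) hnext_lt (by omega) (acc ++ [l.getD i ""])]
      rw [hland]
      conv_rhs => rw [hiq, pvFiltDecomp i q l hi]
      simp

-- bit i of the 25-bit complement
theorem pvComplTestBit (i k n : Nat) (hik : i < k) (hn : n < 2 ^ k) :
    (2 ^ k - 1 - n).testBit i = ! n.testBit i := by
  induction i generalizing k n with
  | zero =>
    have hk : 2 ^ k = 2 * 2 ^ (k - 1) := by
      conv_lhs => rw [show k = (k - 1) + 1 by omega]
      ring
    rw [Nat.testBit_zero, Nat.testBit_zero]
    rcases Nat.mod_two_eq_zero_or_one n with h | h <;>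
      · have : (2 ^ k - 1 - n) % 2 = 1 - n % 2 := by omega
        simp [this, h]
  | succ i ih =>
    have hk : 2 ^ k = 2 * 2 ^ (k - 1) := by
      conv_lhs => rw [show k = (k - 1) + 1 by omega]
      ring
    rw [Nat.testBit_add_one, Nat.testBit_add_one]
    have hhalf : (2 ^ k - 1 - n) / 2 = 2 ^ (k - 1) - 1 - n / 2 := by omega
    rw [hhalf]
    exact ih (k - 1) (n / 2) (by omega) (by omega)

-- A's probe at bit i sees exactly bit i of the 25-bit clamped mask
theorem pvBridge (d : Int) (i : Nat) (hi : i < 25) :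
    (PySem.Int.band d (2 ^ i) ≠ 0) ↔ ((PySem.Int.band d 33554431).toNat.testBit i = true) := by
  have hmask : (33554431 : Int) = ((2 ^ 25 - 1 : Nat) : Int) := by norm_num
  have hpow : ((2 : Int) ^ i) = ((2 ^ i : Nat) : Int) := by push_cast; ring
  by_cases hd : 0 ≤ d
  · rw [hpow, hmask, PySem.Int.band_of_nonneg hd (by positivity),
      PySem.Int.band_of_nonneg hd (by positivity)]
    simp only [Int.toNat_natCast, ne_eq, Nat.cast_eq_zero]
    rw [Nat.and_two_pow, Nat.testBit_and, Nat.testBit_two_pow_sub_one]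
    simp [hi]
  · simp only [PySem.Int.band, hpow, hmask, if_neg hd,
      if_pos (show (0:Int) ≤ ((2 ^ i : Nat) : Int) by positivity),
      if_pos (show (0:Int) ≤ ((2 ^ 25 - 1 : Nat) : Int) by positivity),
      Int.toNat_natCast]
    set n := (-d - 1).toNat with hn
    have hand : 2 ^ i &&& n = (n.testBit i).toNat * 2 ^ i := by
      rw [Nat.and_comm, Nat.and_two_pow]
    have hand2 : 2 ^ 25 - 1 &&& n = n % 2 ^ 25 := by
      rw [Nat.and_comm, Nat.and_two_pow_sub_one_eq_mod]
    rw [hand, hand2, pvComplTestBit i 25 (n % 2 ^ 25) hi (Nat.mod_lt _ (by norm_num)),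
      Nat.testBit_mod_two_pow]
    simp [hi]
    cases n.testBit i <;> simp

theorem pvBandMaskLt (d : Int) : (PySem.Int.band d 33554431).toNat < 2 ^ 25 := by
  simp only [PySem.Int.band]
  split_ifs with h1 h2 h2
  · have : d.toNat &&& (33554431 : Int).toNat ≤ (33554431 : Int).toNat := Nat.and_le_right
    simp at this ⊢
    omega
  · omega
  · have : (33554431 : Int).toNat - ((33554431 : Int).toNat &&& (-d - 1).toNat) ≤ (33554431 : Int).toNat := by omega
    simp at this ⊢
    omega
  · omega

-- the invariant of A's for-loop: probe at 2^k, the rest of the list sees bits k, k+1, …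
theorem pvFoldA (d : Int) (l : List String) (k : Nat) (acc : List String)
    (h : k + l.length ≤ 25) :
    (l.foldl
      (fun (st : List String × Int) cmd =>
        (if PySem.Int.band d st.2 ≠ 0 then st.1 ++ [cmd] else st.1, st.2 * 2))
      (acc, (2 : Int) ^ k)).1
      = acc ++ pvFilt ((PySem.Int.band d 33554431).toNat / 2 ^ k) l := by
  induction l generalizing k acc with
  | nil => simp [pvFilt]
  | cons c l ih =>
    simp only [List.foldl_cons, List.length_cons] at *
    have hk : k < 25 := by omega
    have hcond : (PySem.Int.band d ((2 : Int) ^ k) ≠ 0)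
        ↔ ((PySem.Int.band d 33554431).toNat / 2 ^ k % 2 = 1) := by
      rw [pvBridge d k hk, Nat.testBit_eq_decide_div_mod_eq]
      simp
    have hpow : (2 : Int) ^ k * 2 = (2 : Int) ^ (k + 1) := by ring
    have hdiv : (PySem.Int.band d 33554431).toNat / 2 ^ k / 2
        = (PySem.Int.band d 33554431).toNat / 2 ^ (k + 1) := by
      rw [Nat.div_div_eq_div_mul, pow_succ]
    rw [pvFilt]
    by_cases hc : PySem.Int.band d ((2 : Int) ^ k) ≠ 0
    · rw [if_pos hc, if_pos (hcond.1 hc), hpow, ih (k + 1) (acc ++ [c]) (by omega), hdiv]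
      simp
    · rw [if_neg hc, if_neg (by simpa [hcond] using hc), hpow,
        ih (k + 1) acc (by omega), hdiv]
      simp

-- ===== VERDICT (by name: the statement is the Claim_ definition above) =====
theorem disablesmask_to_string_list_spec : Claim_equal_disablesmask_to_string_list := by
  intro d _
  unfold Spec_disablesmask_to_string_list
  unfold disablesmask_to_string_list disablesmask_to_string_list_alt
  have hA := pvFoldA d
    ["chown","chmod","symlink","mkfifo","mkdev","mksock","mkdir","unlink","rmdir","rename","move","link","create","readdir","read","write","truncate","setlength","appendchunks","snapshot","settrash","setsclass","seteattr","setxattr","setfacl"]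
    0 [] (by simp)
  have hB := pvBLoopEq
    ["chown","chmod","symlink","mkfifo","mkdev","mksock","mkdir","unlink","rmdir","rename","move","link","create","readdir","read","write","truncate","setlength","appendchunks","snapshot","settrash","setsclass","seteattr","setxattr","setfacl"]
    (PySem.Int.band d 33554431).toNat (by simpa using pvBandMaskLt d) []
  simp only [pow_zero] at hA
  simp only [Nat.div_one] at hA
  simp only [hA, hB, List.nil_append]
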